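-- pv_equiv track=rewrite | github.com/fanshaoze/UCT-for-Converter-Design | UCTUsingGNN/UCT_5_UCB_unblc_restruct_DP_v1/ucts/TopoPlanner.py | generate_possible_port_lists
-- ===== SOURCE A (Python) =====
-- from copy import deepcopy
--
-- def port_list_multiply(port_lists_0, port_lists_1):
--     merge_port_list = []
--     for port_list_0 in port_lists_0:
--         for port_list_1 in port_lists_1:
--             tmp_list_0 = deepcopy(port_list_0)
--             tmp_list_0.extend(port_list_1)
--             merge_port_list.append(tmp_list_0)
--     return merge_port_list
--
-- def generate_possible_port_lists(components_with_count):
--     component_port_pairs = []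
--     for comp_idx in range(1, len(components_with_count) - 1):
--         component_port_pairs.append([[components_with_count[comp_idx] + '-left',
--                                       components_with_count[comp_idx] + '-right'],
--                                      [components_with_count[comp_idx] + '-right',
--                                       components_with_count[comp_idx] + '-left']])
--     path_port_list = component_port_pairs[0]
--     for i in range(1, len(component_port_pairs)):
--         path_port_list = port_list_multiply(path_port_list, component_port_pairs[i])
--     return path_port_list
-- ===== SOURCE B (Python) =====
-- def generate_possible_port_lists(components_with_count):
--     # Recursive (back-to-front) Cartesian product over the middle components,
--     # instead of A's incremental left-fold of pairwise list multiplication.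
--     middle = components_with_count[1:-1]
--
--     def expand(i):
--         if i == len(middle):
--             return [[]]
--         c = middle[i]
--         rest = expand(i + 1)
--         out = []
--         for sub in ([c + '-left', c + '-right'], [c + '-right', c + '-left']):
--             for tail in rest:
--                 out.append(sub + tail)
--         return out
--
--     return expand(0)
-- ===== Notes on version B (the rewrite author's own statement) =====
-- stated objective: alternative
-- what changed: Replaces A's incremental left-fold of a pairwise list-multiply helper (building every intermediate product list) with a single back-to-front recursive Cartesian-product expansion over the middle components' two orientation pairs.
import Mathlib
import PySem

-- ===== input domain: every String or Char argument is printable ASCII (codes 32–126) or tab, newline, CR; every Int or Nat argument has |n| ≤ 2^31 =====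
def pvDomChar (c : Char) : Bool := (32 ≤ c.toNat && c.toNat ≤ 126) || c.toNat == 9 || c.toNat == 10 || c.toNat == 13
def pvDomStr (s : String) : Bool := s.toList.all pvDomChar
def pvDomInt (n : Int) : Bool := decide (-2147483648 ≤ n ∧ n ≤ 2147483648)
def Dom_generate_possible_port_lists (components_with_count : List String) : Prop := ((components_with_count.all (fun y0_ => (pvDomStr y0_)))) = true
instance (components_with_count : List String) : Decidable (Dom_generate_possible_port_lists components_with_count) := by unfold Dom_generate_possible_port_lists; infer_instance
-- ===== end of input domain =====

-- B replaces A's incremental left-fold of pairwise list multiplication by a single recursive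
-- Cartesian-product expansion over the middle components (objective: alternative decomposition).

-- ===== PORT A =====
def port_list_multiply (port_lists_0 port_lists_1 : List (List String)) : List (List String) :=
  port_lists_0.foldl (fun acc port_list_0 =>
    port_lists_1.foldl (fun acc2 port_list_1 =>
      acc2 ++ [port_list_0 ++ port_list_1]) acc) []

def generate_possible_port_lists (components_with_count : List String) : List (List String) :=
  let component_port_pairs : List (List (List String)) :=
    (PySem.List.pyRange 1 ((components_with_count.length : Int) - 1) 1).foldl
      (fun acc comp_idx =>
        let c := PySem.List.pyGetD components_with_count comp_idx ""
        acc ++ [[[c ++ "-left", c ++ "-right"], [c ++ "-right", c ++ "-left"]]]) []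
  -- component_port_pairs[0] raises IndexError in Python when the list is empty; Pre_ excludes that
  let path_port_list := PySem.List.pyGetD component_port_pairs 0 []
  (PySem.List.pyRange 1 ((component_port_pairs.length : Int)) 1).foldl
    (fun path i => port_list_multiply path (PySem.List.pyGetD component_port_pairs i [])) path_port_list

-- ===== PORT B =====
def pvExpand (middle : List String) : List (List String) :=
  match middle with
  | [] => [[]]
  | c :: rest =>
      let restLists := pvExpand rest
      ([[c ++ "-left", c ++ "-right"], [c ++ "-right", c ++ "-left"]] : List (List String)).foldl
        (fun out sub => restLists.foldl (fun out2 t => out2 ++ [sub ++ t]) out) []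

def generate_possible_port_lists_alt (components_with_count : List String) : List (List String) :=
  pvExpand (PySem.List.slice components_with_count (some 1) (some (-1)))

-- ===== PRECONDITION & SPEC =====
-- Pre_ excludes inputs with fewer than 3 components: there A's component_port_pairs[0] raises IndexError.
def Pre_generate_possible_port_lists (components_with_count : List String) : Prop :=
  3 ≤ components_with_count.length
instance (components_with_count : List String) : Decidable (Pre_generate_possible_port_lists components_with_count) := by unfold Pre_generate_possible_port_lists; infer_instance
def pvWitness_generate_possible_port_lists : List String := ["a", "b", "c"]

def Spec_generate_possible_port_lists (components_with_count : List String) (out : List (List String)) : Prop := out = generate_possible_port_lists_alt components_with_count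
instance (components_with_count : List String) (out : List (List String)) : Decidable (Spec_generate_possible_port_lists components_with_count out) := by unfold Spec_generate_possible_port_lists; infer_instance

-- ===== CLAIM (what is proved, stated in full; the proofs are below) =====
def Claim_equal_generate_possible_port_lists : Prop := ∀ (components_with_count : List String), Dom_generate_possible_port_lists components_with_count → Pre_generate_possible_port_lists components_with_count → Spec_generate_possible_port_lists components_with_count (generate_possible_port_lists components_with_count)

-- ===== LEMMAS AND PROOFS =====

-- the two orientation sublists of one component
def pvF (c : String) : List (List String) :=
  [[c ++ "-left", c ++ "-right"], [c ++ "-right", c ++ "-left"]]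

theorem mult_eq (xs ys : List (List String)) :
    port_list_multiply xs ys = xs.flatMap (fun x => ys.map (fun y => x ++ y)) := by
  unfold port_list_multiply
  have h : ∀ (x : List String) (acc : List (List String)),
      ys.foldl (fun a y => a ++ [x ++ y]) acc = acc ++ ys.map (fun y => x ++ y) := by
    intro x acc
    rw [PySem.List.foldl_append_eq_flatMap, ← List.map_eq_flatMap]
  calc List.foldl (fun acc x => List.foldl (fun a y => a ++ [x ++ y]) acc ys) [] xs
      = List.foldl (fun acc x => acc ++ ys.map (fun y => x ++ y)) [] xs :=
        PySem.List.foldl_congr_mem _ _ _ _ (fun acc x _ => h x acc)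
    _ = [] ++ xs.flatMap (fun x => ys.map (fun y => x ++ y)) :=
        PySem.List.foldl_append_eq_flatMap _ _ _
    _ = _ := by simp

theorem mult_assoc (a b c : List (List String)) :
    port_list_multiply (port_list_multiply a b) c = port_list_multiply a (port_list_multiply b c) := by
  simp only [mult_eq, List.flatMap_assoc]
  congr 1; funext x
  simp [List.flatMap_map, List.map_flatMap, List.map_map, Function.comp_def, List.append_assoc]

theorem mult_unit (a : List (List String)) : port_list_multiply a [[]] = a := by
  simp [mult_eq]

theorem foldl_mult (t : List (List (List String))) (acc : List (List String)) :
    t.foldl port_list_multiply acc = port_list_multiply acc (t.foldr port_list_multiply [[]]) := by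
  induction t generalizing acc with
  | nil => simp [mult_unit]
  | cons p t ih => simp [List.foldl_cons, List.foldr_cons, ih, mult_assoc]

theorem pvExpand_cons (c : String) (rest : List String) :
    pvExpand (c :: rest) = port_list_multiply (pvF c) (pvExpand rest) := rfl

theorem pvExpand_eq (m : List String) :
    pvExpand m = (m.map pvF).foldr port_list_multiply [[]] := by
  induction m with
  | nil => rfl
  | cons c rest ih => rw [pvExpand_cons, ih]; rfl

theorem slice_one_neg_one (xs : List String) :
    PySem.List.slice xs (some 1) (some (-1)) = xs.dropLast.tail := by
  simp [PySem.List.slice]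
  rcases xs with _ | ⟨x, xs⟩
  · simp
  · simp [List.dropLast_eq_take]
    rcases xs with _ | ⟨y, ys⟩ <;> simp

-- A's pair-building loop builds exactly the map of pvF over the middle components
theorem pairs_eq (cwc : List String) (h : 1 ≤ cwc.length) :
    (PySem.List.pyRange 1 ((cwc.length : Int) - 1) 1).foldl
      (fun acc comp_idx =>
        let c := PySem.List.pyGetD cwc comp_idx ""
        acc ++ [[[c ++ "-left", c ++ "-right"], [c ++ "-right", c ++ "-left"]]]) []
    = (cwc.dropLast.tail).map pvF := by
  have hb : ((cwc.length : Int) - 1) = (cwc.dropLast.length : Int) := by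
    simp [List.length_dropLast]; omega
  rw [hb]
  have hcg : (PySem.List.pyRange 1 ((cwc.dropLast.length : Int)) 1).foldl
      (fun acc comp_idx =>
        let c := PySem.List.pyGetD cwc comp_idx ""
        acc ++ [[[c ++ "-left", c ++ "-right"], [c ++ "-right", c ++ "-left"]]]) []
      = (PySem.List.pyRange 1 ((cwc.dropLast.length : Int)) 1).foldl
      (fun acc comp_idx => acc ++ [pvF (PySem.List.pyGetD cwc.dropLast comp_idx "")]) [] := by
    apply PySem.List.foldl_congr_mem
    intro acc j hj
    rw [PySem.List.mem_pyRange_one] at hj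
    have h0 : (0:Int) ≤ j := by omega
    have hlt : j < (cwc.dropLast.length : Int) := hj.2
    have hlt' : j < (cwc.length : Int) := by
      simp [List.length_dropLast] at hlt ⊢; omega
    rw [PySem.List.pyGetD_eq_getElem _ _ h0 hlt', PySem.List.pyGetD_eq_getElem _ _ h0 hlt]
    simp [pvF, List.getElem_dropLast]
  rw [hcg, PySem.List.foldl_pyRange_pyGetD' cwc.dropLast "" (fun acc x => acc ++ [pvF x]) [] (by norm_num : (0:Int) ≤ 1)]
  rw [PySem.List.foldl_append_eq_flatMap, ← List.map_eq_flatMap]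
  simp [List.drop_one]

-- A's product loop, started at pairs[0], is the right-fold product = pvExpand
theorem main_fold (c : String) (rest : List String) :
    (PySem.List.pyRange 1 ((((c :: rest).map pvF).length : Int)) 1).foldl
      (fun path i => port_list_multiply path (PySem.List.pyGetD ((c :: rest).map pvF) i []))
      (PySem.List.pyGetD ((c :: rest).map pvF) 0 []) = pvExpand (c :: rest) := by
  rw [PySem.List.foldl_pyRange_pyGetD' ((c :: rest).map pvF) [] port_list_multiply _ (by norm_num : (0:Int) ≤ 1)]
  have h0 : PySem.List.pyGetD ((c :: rest).map pvF) 0 [] = pvF c := by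
    simp [PySem.List.pyGetD_zero_cons]
  rw [h0]
  simp only [Int.toNat_one, List.map_cons, List.drop_succ_cons, List.drop_zero]
  rw [foldl_mult, pvExpand_cons, pvExpand_eq]

-- ===== VERDICT (by name: the statement is the Claim_ definition above) =====
theorem generate_possible_port_lists_spec : Claim_equal_generate_possible_port_lists := by
  intro cwc _ hpre
  unfold Pre_generate_possible_port_lists at hpre
  show generate_possible_port_lists cwc = generate_possible_port_lists_alt cwc
  unfold generate_possible_port_lists generate_possible_port_lists_alt
  rw [slice_one_neg_one]
  simp only [pairs_eq cwc (by omega)]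
  obtain ⟨c, rest, hm⟩ : ∃ c rest, cwc.dropLast.tail = c :: rest := by
    rcases h : cwc.dropLast.tail with _ | ⟨c, rest⟩
    · exfalso
      have := congrArg List.length h
      simp [List.length_dropLast] at this; omega
    · exact ⟨c, rest, rfl⟩
  rw [hm]
  exact main_fold c rest
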